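-- pv_equiv track=rewrite | github.com/riteshco/ImgGenWFC | utils.py | transform_tiles
-- ===== SOURCE A (Python) =====
-- def transform_tiles(tiles , block_size , rows , cols):
--     new_tiles = []
--
--     for y in range(0, rows):
--         for x in range(0, cols):
--             block = []
--             for dy in range(block_size):
--                 block_row = []
--                 for dx in range(block_size):
--                     wrapped_y = (y + dy) % rows
--                     wrapped_x = (x + dx) % cols
--                     block_row.append(tiles[wrapped_y][wrapped_x])
--                 block.append(block_row)
--             new_tiles.append(block)
--     return new_tiles
-- ===== SOURCE B (Python) =====
-- def transform_tiles(tiles, block_size, rows, cols):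
--     # Precompute a wrapped (padded) grid once by list repetition, then cut
--     # each block out with plain contiguous slices -- no modulo per element.
--     if rows <= 0 or cols <= 0:
--         return []
--     width = cols + block_size - 1
--     height = rows + block_size - 1
--     reps_x = width // cols + 1
--     reps_y = height // rows + 1
--     padded = [(row[:cols] * reps_x)[:width] for row in tiles[:rows]]
--     padded = (padded * reps_y)[:height]
--     return [[padded[y + dy][x:x + block_size] for dy in range(block_size)]
--             for y in range(rows) for x in range(cols)]
-- ===== Notes on version B (the rewrite author's own statement) =====
-- stated objective: alternative
-- what changed: B builds the wrapped (padded) grid once by list repetition/slicing and then extracts every block with plain contiguous slices, instead of A's four nested loops computing a modulo for each element.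
import Mathlib
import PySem

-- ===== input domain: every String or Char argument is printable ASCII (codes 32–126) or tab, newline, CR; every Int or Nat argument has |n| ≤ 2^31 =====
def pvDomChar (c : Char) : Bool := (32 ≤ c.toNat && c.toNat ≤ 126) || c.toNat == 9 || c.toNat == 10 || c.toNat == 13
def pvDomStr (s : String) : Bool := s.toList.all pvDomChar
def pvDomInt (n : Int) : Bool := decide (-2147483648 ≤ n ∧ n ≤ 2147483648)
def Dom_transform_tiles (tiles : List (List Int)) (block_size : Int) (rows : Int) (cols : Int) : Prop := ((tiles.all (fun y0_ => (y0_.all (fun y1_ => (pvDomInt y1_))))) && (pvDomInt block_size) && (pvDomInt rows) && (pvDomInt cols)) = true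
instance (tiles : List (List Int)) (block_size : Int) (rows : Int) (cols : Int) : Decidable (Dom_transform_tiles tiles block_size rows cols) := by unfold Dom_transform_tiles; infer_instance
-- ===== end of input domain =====

-- B precomputes the wrapped (padded) grid once by list repetition and cuts each
-- block out with contiguous slices (no per-element modulo); objective: alternative decomposition.

-- ===== PORT A =====
def transform_tiles (tiles : List (List Int)) (block_size : Int) (rows : Int) (cols : Int) : List (List (List Int)) :=
  (PySem.List.pyRange 0 rows 1).foldl (fun new_tiles y =>
    (PySem.List.pyRange 0 cols 1).foldl (fun new_tiles x =>
      new_tiles ++ [(PySem.List.pyRange 0 block_size 1).foldl (fun block dy =>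
        block ++ [(PySem.List.pyRange 0 block_size 1).foldl (fun block_row dx =>
          let wrapped_y := PySem.Int.mod (y + dy) rows
          let wrapped_x := PySem.Int.mod (x + dx) cols
          block_row ++ [PySem.List.pyGetD (PySem.List.pyGetD tiles wrapped_y []) wrapped_x 0]) []]) []]) new_tiles) []

-- ===== PORT B =====
def transform_tiles_alt (tiles : List (List Int)) (block_size : Int) (rows : Int) (cols : Int) : List (List (List Int)) :=
  if rows ≤ 0 ∨ cols ≤ 0 then []
  else
    let width := cols + block_size - 1
    let height := rows + block_size - 1
    let repsX := PySem.Int.floordiv width cols + 1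
    let repsY := PySem.Int.floordiv height rows + 1
    let padded0 := (PySem.List.slice tiles none (some rows)).map (fun row =>
        PySem.List.slice ((List.replicate repsX.toNat (PySem.List.slice row none (some cols))).flatten) none (some width))
    let padded := PySem.List.slice ((List.replicate repsY.toNat padded0).flatten) none (some height)
    (PySem.List.pyRange 0 rows 1).flatMap (fun y =>
      (PySem.List.pyRange 0 cols 1).map (fun x =>
        (PySem.List.pyRange 0 block_size 1).map (fun dy =>
          PySem.List.slice (PySem.List.pyGetD padded (y + dy) []) (some x) (some (x + block_size)))))

-- ===== PRECONDITION & SPEC =====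
-- Pre_ excludes exactly the inputs on which A raises IndexError: when all three
-- loop bounds are positive A reads tiles[i][j] for every i < rows, j < cols, so the
-- grid must actually have rows rows each of length ≥ cols.
def Pre_transform_tiles (tiles : List (List Int)) (block_size : Int) (rows : Int) (cols : Int) : Prop :=
  (0 < rows ∧ 0 < cols ∧ 0 < block_size) →
    (rows ≤ tiles.length ∧ ∀ row ∈ tiles.take rows.toNat, cols ≤ row.length)
instance (tiles : List (List Int)) (block_size : Int) (rows : Int) (cols : Int) : Decidable (Pre_transform_tiles tiles block_size rows cols) := by unfold Pre_transform_tiles; infer_instance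

def pvWitness_transform_tiles : List (List Int) × Int × Int × Int := ([[1, 2], [3, 4]], 2, 2, 2)

def Spec_transform_tiles (tiles : List (List Int)) (block_size : Int) (rows : Int) (cols : Int) (out : List (List (List Int))) : Prop := out = transform_tiles_alt tiles block_size rows cols
instance (tiles : List (List Int)) (block_size : Int) (rows : Int) (cols : Int) (out : List (List (List Int))) : Decidable (Spec_transform_tiles tiles block_size rows cols out) := by unfold Spec_transform_tiles; infer_instance

-- ===== CLAIM (what is proved, stated in full; the proofs are below) =====
def Claim_equal_transform_tiles : Prop := ∀ (tiles : List (List Int)) (block_size : Int) (rows : Int) (cols : Int), Dom_transform_tiles tiles block_size rows cols → Pre_transform_tiles tiles block_size rows cols → Spec_transform_tiles tiles block_size rows cols (transform_tiles tiles block_size rows cols)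

-- ===== LEMMAS AND PROOFS =====

-- common elementwise description of the result
def pvSpec (tiles : List (List Int)) (block_size : Int) (rows : Int) (cols : Int) : List (List (List Int)) :=
  (PySem.List.pyRange 0 rows 1).flatMap (fun y =>
    (PySem.List.pyRange 0 cols 1).map (fun x =>
      (PySem.List.pyRange 0 block_size 1).map (fun dy =>
        (PySem.List.pyRange 0 block_size 1).map (fun dx =>
          PySem.List.pyGetD (PySem.List.pyGetD tiles (PySem.Int.mod (y + dy) rows) [])
            (PySem.Int.mod (x + dx) cols) 0))))

theorem pv_flatMap_sing {α β : Type} (f : α → β) (l : List α) :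
    l.flatMap (fun x => [f x]) = l.map f := by
  induction l with
  | nil => rfl
  | cons a t ih => simp [List.flatMap_cons, ih]

theorem pvA_eq_spec (tiles : List (List Int)) (block_size rows cols : Int) :
    transform_tiles tiles block_size rows cols = pvSpec tiles block_size rows cols := by
  unfold transform_tiles pvSpec
  simp [← List.flatMap_def, pv_flatMap_sing]

theorem pv_lt_div_succ_mul (a b : Nat) (h : 0 < b) : a < (a / b + 1) * b := by
  have h1 := Nat.div_add_mod a b
  have h2 := Nat.mod_lt a h
  rw [Nat.add_mul, Nat.one_mul, Nat.mul_comm]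
  omega

-- element i of the W-prefix of l repeated W/len(l)+1 times is l[i % len(l)]
theorem pv_flatten_replicate_getElem {α : Type} (k : Nat) (l : List α) (i : Nat)
    (h : i < k * l.length) :
    ((List.replicate k l).flatten)[i]? = l[i % l.length]? := by
  induction k generalizing i with
  | zero => simp at h
  | succ k ih =>
    have hflat : (List.replicate (k+1) l).flatten = l ++ (List.replicate k l).flatten := by
      simp [List.replicate_succ]
    rw [hflat]
    by_cases hi : i < l.length
    · rw [List.getElem?_append_left hi, Nat.mod_eq_of_lt hi]
    · have hlen : 0 < l.length := by
        rcases Nat.eq_zero_or_pos l.length with h0 | h0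
        · rw [h0] at h; omega
        · exact h0
      have hle : l.length ≤ i := Nat.le_of_not_lt hi
      rw [Nat.add_mul, Nat.one_mul] at h
      rw [List.getElem?_append_right hle, ih (i - l.length) (by omega)]
      have : i - l.length + l.length = i := by omega
      rw [← Nat.add_mod_right (i - l.length) l.length, this]

theorem pv_tile_getElem {α : Type} (l : List α) (L W i : Nat)
    (hL : l.length = L) (hpos : 0 < L) (hi : i < W) :
    (PySem.List.slice ((List.replicate (W / L + 1) l).flatten) none (some (W : Int)))[i]? =
      l[i % L]? := by
  subst hL
  rw [PySem.List.slice_to_natCast, List.getElem?_take, if_pos hi]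
  exact pv_flatten_replicate_getElem _ _ _
    (lt_of_lt_of_le hi (le_of_lt (pv_lt_div_succ_mul W _ hpos)))

theorem pv_tile_length {α : Type} (l : List α) (L W : Nat) (hL : l.length = L) (hpos : 0 < L) :
    (PySem.List.slice ((List.replicate (W / L + 1) l).flatten) none (some (W : Int))).length = W := by
  subst hL
  rw [PySem.List.slice_to_natCast, List.length_take, List.length_flatten]
  simp only [List.map_replicate, List.sum_replicate, smul_eq_mul]
  have := pv_lt_div_succ_mul W l.length hpos
  omega

theorem pvB_eq_spec (tiles : List (List Int)) (block_size rows cols : Int)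
    (hpre : Pre_transform_tiles tiles block_size rows cols) :
    transform_tiles_alt tiles block_size rows cols = pvSpec tiles block_size rows cols := by
  unfold transform_tiles_alt pvSpec
  by_cases hr : rows ≤ 0
  · rw [if_pos (Or.inl hr), PySem.List.pyRange_one_eq_nil hr]
    rfl
  by_cases hc : cols ≤ 0
  · rw [if_pos (Or.inr hc), PySem.List.pyRange_one_eq_nil hc]
    simp [List.flatMap_def]
  push_neg at hr hc
  rw [if_neg (by push_neg; exact ⟨hr, hc⟩)]
  simp only []
  by_cases hb : block_size ≤ 0
  · rw [PySem.List.pyRange_one_eq_nil hb]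
    simp
  push_neg at hb
  -- main case: all three loop bounds positive
  obtain ⟨hlen, hcols⟩ := hpre ⟨hr, hc, hb⟩
  set R : Nat := rows.toNat with hR
  set C : Nat := cols.toNat with hC
  set B : Nat := block_size.toNat with hB
  have hrows : rows = (R : Int) := by omega
  have hcolsI : cols = (C : Int) := by omega
  have hbs : block_size = (B : Int) := by omega
  have hRpos : 0 < R := by omega
  have hCpos : 0 < C := by omega
  have hBpos : 0 < B := by omega
  have hRlen : R ≤ tiles.length := by omega
  set W : Nat := C + B - 1 with hW
  set H : Nat := R + B - 1 with hH
  have hwidth : cols + block_size - 1 = (W : Int) := by omega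
  have hheight : rows + block_size - 1 = (H : Int) := by omega
  have hp0 : PySem.List.slice tiles none (some rows) = tiles.take R := by
    rw [hrows, PySem.List.slice_to_natCast]
  set padded0 : List (List Int) := (tiles.take R).map (fun row =>
      PySem.List.slice ((List.replicate (W / C + 1)
        (PySem.List.slice row none (some cols))).flatten) none (some (W : Int))) with hpadded0
  have hrepsX : (PySem.Int.floordiv (cols + block_size - 1) cols + 1).toNat = W / C + 1 := by
    rw [hwidth, hcolsI, PySem.Int.floordiv_natCast]
    generalize W / C = q
    omega
  have hrepsY : (PySem.Int.floordiv (rows + block_size - 1) rows + 1).toNat = H / R + 1 := by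
    rw [hheight, hrows, PySem.Int.floordiv_natCast]
    generalize H / R = q
    omega
  rw [hrepsX, hrepsY, hp0, hwidth, hheight, ← hpadded0]
  have hp0len : padded0.length = R := by
    rw [hpadded0, List.length_map, List.length_take]; omega
  set PAD : List (List Int) := PySem.List.slice ((List.replicate (H / R + 1) padded0).flatten)
      none (some (H : Int)) with hPAD
  have hPADlen : PAD.length = H := by
    rw [hPAD]; exact pv_tile_length padded0 R H hp0len hRpos
  have hPADget : ∀ i : Nat, i < H → PAD[i]? = padded0[i % R]? := by
    intro i hi
    rw [hPAD]; exact pv_tile_getElem padded0 R H i hp0len hRpos hi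
  -- pointwise over y, x, dy
  rw [List.flatMap_def, List.flatMap_def]
  refine congrArg List.flatten (List.map_congr_left ?_)
  intro y hy
  obtain ⟨hy0, hy1⟩ := PySem.List.mem_pyRange_one.mp hy
  refine List.map_congr_left ?_
  intro x hx
  obtain ⟨hx0, hx1⟩ := PySem.List.mem_pyRange_one.mp hx
  refine List.map_congr_left ?_
  intro dy hdy
  obtain ⟨hdy0, hdy1⟩ := PySem.List.mem_pyRange_one.mp hdy
  -- the core block-row equality
  set n : Nat := (y + dy).toNat with hn
  have hnval : y + dy = (n : Int) := by omega
  have hnH : n < H := by omega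
  have hnR : n % R < R := Nat.mod_lt _ hRpos
  have hnRlen : n % R < tiles.length := by omega
  set row : List Int := tiles[n % R] with hrow
  have hrowmem : row ∈ tiles.take R := by
    rw [hrow]
    have : (tiles.take R)[n % R]? = some tiles[n % R] := by
      rw [List.getElem?_take, if_pos hnR, List.getElem?_eq_getElem hnRlen]
    exact List.mem_of_getElem? this
  have hrowC : C ≤ row.length := by
    have := hcols row hrowmem
    omega
  have hsliceC : (PySem.List.slice row none (some cols)).length = C := by
    rw [hcolsI, PySem.List.slice_to_natCast, List.length_take]; omega
  set PR : List Int := PySem.List.slice ((List.replicate (W / C + 1)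
      (PySem.List.slice row none (some cols))).flatten) none (some (W : Int)) with hPR
  have hPRlen : PR.length = W := by
    rw [hPR]; exact pv_tile_length _ C W hsliceC hCpos
  have hPRget : ∀ i : Nat, i < W → PR[i]? = row[i % C]? := by
    intro i hi
    rw [hPR, pv_tile_getElem _ C W i hsliceC hCpos hi, hcolsI, PySem.List.slice_to_natCast,
      List.getElem?_take, if_pos (Nat.mod_lt _ hCpos)]
  -- pyGetD PAD (y + dy) [] is the padded row PR
  have hPADn : PySem.List.pyGetD PAD (y + dy) [] = PR := by
    rw [PySem.List.pyGetD_eq_getElem PAD [] (by omega) (by rw [hPADlen]; omega)]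
    have h1 : PAD[(y + dy).toNat]? = some PAD[(y + dy).toNat] :=
      List.getElem?_eq_getElem (by rw [hPADlen]; omega)
    have h2 : PAD[(y + dy).toNat]? = padded0[n % R]? := by
      rw [← hn]; exact hPADget n hnH
    have h3 : padded0[n % R]? = some PR := by
      rw [hpadded0, List.getElem?_map]
      have h4 : (tiles.take R)[n % R]? = some row := by
        rw [List.getElem?_take, if_pos hnR, List.getElem?_eq_getElem hnRlen, hrow]
      rw [h4, Option.map_some, hPR]
    exact Option.some.inj (h1.symm.trans (h2.trans h3))
  rw [hPADn]
  -- the slice of PR equals the modulo-indexed block row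
  set x' : Nat := x.toNat with hx'
  have hxval : x = (x' : Int) := by omega
  have hx'C : x' < C := by omega
  rw [hxval, hbs, PySem.List.slice_natCast_add]
  refine List.ext_getElem? ?_
  intro i
  by_cases hiB : i < B
  · rw [List.getElem?_take, if_pos hiB, List.getElem?_drop,
      PySem.List.getElem?_map_pyRange_zero _ _ _ hiB,
      hPRget (x' + i) (by omega)]
    have hmody : PySem.Int.mod (y + dy) rows = (((n % R : Nat)) : Int) := by
      rw [hnval, hrows, PySem.Int.mod_natCast]
    have hmodx : PySem.Int.mod ((x' : Int) + (i : Int)) cols = (((x' + i) % C : Nat) : Int) := by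
      rw [hcolsI, ← Nat.cast_add, PySem.Int.mod_natCast]
    rw [hmody, hmodx]
    rw [show PySem.List.pyGetD tiles (((n % R : Nat)) : Int) [] = row by
      rw [PySem.List.pyGetD_natCast, List.getD_eq_getElem tiles [] hnRlen, hrow]]
    rw [PySem.List.pyGetD_natCast,
      List.getD_eq_getElem row 0 (by have := Nat.mod_lt (x' + i) hCpos; omega),
      List.getElem?_eq_getElem (by have := Nat.mod_lt (x' + i) hCpos; omega)]
  · have h5 : ((PR.drop x').take B)[i]? = none := by
      rw [List.getElem?_take, if_neg hiB]
    have h6 : ((PySem.List.pyRange 0 (B : Int)).map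
        (fun dx => PySem.List.pyGetD (PySem.List.pyGetD tiles (PySem.Int.mod (y + dy) rows) [])
          (PySem.Int.mod ((x' : Int) + dx) cols) 0))[i]? = none := by
      rw [List.getElem?_eq_none_iff]
      rw [List.length_map, PySem.List.length_pyRange_one]
      omega
    rw [h5, h6]

-- ===== VERDICT (by name: the statement is the Claim_ definition above) =====
theorem transform_tiles_spec : Claim_equal_transform_tiles := by
  intro tiles bs rows cols _ hpre
  unfold Spec_transform_tiles
  rw [pvA_eq_spec, pvB_eq_spec tiles bs rows cols hpre]
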